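-- pv_equiv track=rewrite | github.com/rmartz/advent-of-code-2020 | day-14/part2.py | mask_permutations
-- ===== SOURCE A (Python) =====
-- def mask_permutations(mask):
--     prefix = ""
--     for i, c in enumerate(mask):
--         # 0 is the new "unchanged"
--         if c == "0":
--             prefix += "X"
--         # 1 means set to 1
--         elif c == "1":
--             prefix += "1"
--         # X means both set to 1 and 0
--         if c == "X":
--             remainder = mask[i + 1 :]
--             for suffix in mask_permutations(remainder):
--                 yield prefix + "0" + suffix
--                 yield prefix + "1" + suffix
--             return
--     yield prefix
-- ===== SOURCE B (Python) =====
-- def mask_permutations(mask):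
--     # One pass builds a template (None marks a floating bit), then counts up 0..2^k-1,
--     # filling bit j of n into the j-th X from the left (leftmost X = least significant bit).
--     template = []
--     k = 0
--     for c in mask:
--         if c == "0":
--             template.append("X")
--         elif c == "1":
--             template.append("1")
--         elif c == "X":
--             template.append(None)
--             k += 1
--     for n in range(2 ** k):
--         out = []
--         j = 0
--         for c in template:
--             if c is None:
--                 out.append(str((n >> j) & 1))
--                 j += 1
--             else:
--                 out.append(c)
--         yield "".join(out)
-- ===== Notes on version B (the rewrite author's own statement) =====
-- stated objective: alternative
-- what changed: Replaces A's recursive generator (recurse past each floating-bit character and prepend prefix+bit to every suffix) by a single template-building pass plus a counter over range(2**k) whose bit j fills the j-th floating position from the left.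
import Mathlib
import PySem

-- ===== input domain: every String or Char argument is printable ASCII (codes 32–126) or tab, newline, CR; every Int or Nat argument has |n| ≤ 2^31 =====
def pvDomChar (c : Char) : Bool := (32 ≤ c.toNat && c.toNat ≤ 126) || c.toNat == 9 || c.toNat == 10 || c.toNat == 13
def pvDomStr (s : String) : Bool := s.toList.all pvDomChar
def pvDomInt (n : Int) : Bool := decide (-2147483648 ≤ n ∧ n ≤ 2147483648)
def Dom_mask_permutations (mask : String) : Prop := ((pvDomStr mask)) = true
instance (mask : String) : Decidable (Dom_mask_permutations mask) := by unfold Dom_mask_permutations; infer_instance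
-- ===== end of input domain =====

-- B replaces A's recursive generator (recurse past each 'X', yield prefix+bit+suffix) by a single
-- template pass plus counting n in range(2^k) with bit j of n filling the j-th 'X' from the left;
-- objective: alternative decomposition (same output, no recursion).

-- ===== PORT A =====
-- A's loop with the growing `pfx` and return-on-'X'; strings as List Char, String.mk at the end.
def maskPermA (pfx : List Char) : List Char → List (List Char)
  | [] => [pfx]
  | c :: rest =>
    if c = 'X' then
      -- recurse on the remainder, yield pfx+"0"+suffix then pfx+"1"+suffix, then return
      (maskPermA [] rest).flatMap (fun suffix => [pfx ++ '0' :: suffix, pfx ++ '1' :: suffix])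
    else
      maskPermA (pfx ++ (if c = '0' then ['X'] else if c = '1' then ['1'] else [])) rest

def mask_permutations (mask : String) : List String :=
  (maskPermA [] mask.toList).map String.mk

-- ===== PORT B =====
-- one pass: template with `none` at each floating bit, k = number of floats
def maskTemplate : List Char → List (Option Char)
  | [] => []
  | c :: rest =>
    (if c = '0' then [some 'X'] else if c = '1' then [some '1']
     else if c = 'X' then [none] else []) ++ maskTemplate rest

-- fill template: position j-th `none` gets bit j of n (str((n >> j) & 1))
def maskFillB (n : Nat) : List (Option Char) → Nat → List Char
  | [], _ => []
  | some c :: rest, j => c :: maskFillB n rest j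
  | none :: rest, j => (if (n >>> j) % 2 = 1 then '1' else '0') :: maskFillB n rest (j + 1)

def mask_permutations_alt (mask : String) : List String :=
  let template := maskTemplate mask.toList
  let k := template.count none
  (List.range (2 ^ k)).map (fun n => String.mk (maskFillB n template 0))

-- ===== PRECONDITION & SPEC =====
def Spec_mask_permutations (mask : String) (out : List String) : Prop := out = mask_permutations_alt mask
instance (mask : String) (out : List String) : Decidable (Spec_mask_permutations mask out) := by unfold Spec_mask_permutations; infer_instance

-- ===== CLAIM (what is proved, stated in full; the proofs are below) =====
def Claim_equal_mask_permutations : Prop := ∀ (mask : String), Dom_mask_permutations mask → Spec_mask_permutations mask (mask_permutations mask)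

-- ===== LEMMAS AND PROOFS =====

-- A's pfx accumulator just prepends
lemma maskPermA_pfx (cs : List Char) : ∀ (p : List Char),
    maskPermA p cs = (maskPermA [] cs).map (p ++ ·) := by
  induction cs with
  | nil => intro p; simp [maskPermA]
  | cons c rest ih =>
    intro p
    by_cases hx : c = 'X'
    · simp [maskPermA, hx, List.map_flatMap]
    · simp only [maskPermA, if_neg hx, List.nil_append]
      conv_lhs => rw [ih]
      conv_rhs => rw [ih]
      simp [List.map_map, Function.comp_def, List.append_assoc]

-- shifting the fill index by one is dividing n by two
lemma maskFillB_shift (n : Nat) (t : List (Option Char)) : ∀ j,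
    maskFillB n t (j + 1) = maskFillB (n / 2) t j := by
  induction t with
  | nil => intro j; simp [maskFillB]
  | cons o rest ih =>
    intro j
    cases o with
    | some c => simp [maskFillB, ih]
    | none =>
      simp only [maskFillB, ih]
      congr 2
      simp [Nat.shiftRight_eq_div_pow, pow_succ, Nat.div_div_eq_div_mul, Nat.mul_comm]

-- splitting a doubled range into consecutive pairs
lemma range_double_pairs {α : Type} (h : Nat → Nat → α) : ∀ (N : Nat),
    (List.range (2 * N)).map (fun n => h (n % 2) (n / 2))
      = (List.range N).flatMap (fun m => [h 0 m, h 1 m]) := by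
  intro N
  induction N with
  | zero => simp
  | succ N ih =>
    have : 2 * (N + 1) = (2 * N + 1) + 1 := by omega
    rw [this, List.range_succ, List.range_succ, List.range_succ, List.flatMap_append]
    simp only [List.map_append, ih]
    have h1 : (2 * N) % 2 = 0 := by omega
    have h2 : (2 * N) / 2 = N := by omega
    have h3 : (2 * N + 1) % 2 = 1 := by omega
    have h4 : (2 * N + 1) / 2 = N := by omega
    simp [h1, h2, h3, h4]

-- core equivalence at the List Char level
lemma maskPerm_eq (cs : List Char) :
    maskPermA [] cs
      = (List.range (2 ^ (maskTemplate cs).count none)).map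
          (fun n => maskFillB n (maskTemplate cs) 0) := by
  induction cs with
  | nil => simp [maskPermA, maskTemplate, maskFillB]
  | cons c rest ih =>
    by_cases hx : c = 'X'
    · -- floating bit: k grows by one, leftmost X is bit 0
      have hc0 : ¬ (c = '0') := by rw [hx]; decide
      have hc1 : ¬ (c = '1') := by rw [hx]; decide
      simp only [maskPermA, maskTemplate, if_pos hx, if_neg hc0, if_neg hc1,
        List.singleton_append]
      set T := maskTemplate rest with hT
      set N := 2 ^ (T.count none) with hN
      have hk : ((none : Option Char) :: T).count none = T.count none + 1 := by
        simp [List.count_cons]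
      rw [hk, pow_succ, Nat.mul_comm]
      have hmap : (List.range (2 * N)).map (fun n => maskFillB n (none :: T) 0)
          = (List.range (2 * N)).map (fun n =>
              (fun b m => (if b = 1 then '1' else '0') :: maskFillB m T 0) (n % 2) (n / 2)) := by
        apply List.map_congr_left
        intro n _
        simp only [maskFillB, maskFillB_shift, Nat.shiftRight_zero, Nat.zero_add]
        rfl
      rw [hmap, range_double_pairs (fun b m => (if b = 1 then '1' else '0') :: maskFillB m T 0) N,
        ih]
      simp [List.flatMap_map]
    · simp only [maskPermA, if_neg hx]
      rw [maskPermA_pfx, ih]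
      by_cases h0 : c = '0'
      · simp only [maskTemplate, if_pos h0, if_neg hx, List.singleton_append]
        simp [List.count_cons, maskFillB, List.map_map, Function.comp_def]
      · by_cases h1 : c = '1'
        · simp only [maskTemplate, if_neg h0, if_pos h1, List.singleton_append]
          simp [List.count_cons, maskFillB, List.map_map, Function.comp_def]
        · simp only [maskTemplate, if_neg h0, if_neg h1, if_neg hx, List.nil_append]
          simp [List.map_map, Function.comp_def]

-- ===== VERDICT (by name: the statement is the Claim_ definition above) =====
theorem mask_permutations_spec : Claim_equal_mask_permutations := by
  intro mask _
  unfold Spec_mask_permutations mask_permutations mask_permutations_alt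
  simp only [maskPerm_eq, List.map_map]
  rfl
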